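-- pv_equiv track=rewrite | github.com/rafisf1/rafijuntest | agent_scraper.py | match_agent_contacts
-- ===== SOURCE A (Python) =====
-- from typing import List, Dict, Optional, Tuple
--
-- def match_agent_contacts(agent_name: str, contact_info: List[Tuple[str, str, str]]) -> Tuple[Optional[str], Optional[str]]:
--     """Match contact information to an agent based on name proximity and context."""
--     best_email = None
--     best_phone = None
--     best_email_distance = float('inf')
--     best_phone_distance = float('inf')
--
--     # Split agent name into parts for more flexible matching
--     name_parts = agent_name.lower().split()
--
--     for contact_type, value, context in contact_info:
--         # Check if any part of the agent's name appears in the context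
--         context_lower = context.lower()
--         name_found = any(part in context_lower for part in name_parts)
--
--         if name_found:
--             # Calculate distance to the name in the context
--             distance = len(context) // 2  # Approximate distance to name
--
--             if contact_type == 'email' and distance < best_email_distance:
--                 best_email = value
--                 best_email_distance = distance
--             elif contact_type == 'phone' and distance < best_phone_distance:
--                 best_phone = value
--                 best_phone_distance = distance
--
--     return best_email, best_phone
-- ===== SOURCE B (Python) =====
-- from typing import List, Optional, Tuple
--
-- def match_agent_contacts(agent_name: str, contact_info: List[Tuple[str, str, str]]) -> Tuple[Optional[str], Optional[str]]:
--     """Two-phase version: first collect the matching contacts with their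
--     distance, then pick the best of each category with min(default=None)."""
--     parts = agent_name.lower().split()
--     matched = [(t, v, len(c) // 2) for t, v, c in contact_info
--                if any(p in c.lower() for p in parts)]
--     emails = [(v, d) for t, v, d in matched if t == 'email']
--     phones = [(v, d) for t, v, d in matched if t == 'phone']
--     best_email = min(emails, key=lambda x: x[1], default=None)
--     best_phone = min(phones, key=lambda x: x[1], default=None)
--     return (best_email[0] if best_email else None,
--             best_phone[0] if best_phone else None)
-- ===== Notes on version B (the rewrite author's own statement) =====
-- stated objective: alternative
-- what changed: Replaces the single interleaved running-min loop with four explicit best-so-far variables by a filter/group pass building per-category (value, distance) lists followed by an independent min(key, default=None) selection per category.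
import Mathlib
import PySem

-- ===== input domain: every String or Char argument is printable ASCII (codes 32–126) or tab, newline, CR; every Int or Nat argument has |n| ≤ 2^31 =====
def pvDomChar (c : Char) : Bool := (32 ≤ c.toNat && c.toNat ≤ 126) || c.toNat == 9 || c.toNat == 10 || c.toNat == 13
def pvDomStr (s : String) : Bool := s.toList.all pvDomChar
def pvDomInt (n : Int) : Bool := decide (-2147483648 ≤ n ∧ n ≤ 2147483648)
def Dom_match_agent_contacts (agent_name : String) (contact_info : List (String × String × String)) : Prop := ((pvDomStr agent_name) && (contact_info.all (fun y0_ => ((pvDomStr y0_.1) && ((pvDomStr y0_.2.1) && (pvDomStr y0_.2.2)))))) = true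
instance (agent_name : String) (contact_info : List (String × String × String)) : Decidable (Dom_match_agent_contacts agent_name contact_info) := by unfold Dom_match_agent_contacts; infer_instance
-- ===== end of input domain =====

-- B replaces A's interleaved running-min loop (four best-so-far variables) by a
-- filter/group pass followed by an independent first-min selection per category
-- (same cost; objective: alternative decomposition).


-- ===== PORT A =====
-- 'distance < best_distance' where the best distance starts at float('inf'):
-- none models inf (everything is < inf).
def pvLtInf (d : Int) (bd : Option Int) : Bool :=
  match bd with
  | none => true
  | some x => decide (d < x)

-- one iteration of A's for-loop; state = (best_email, best_phone, best_email_distance, best_phone_distance)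
def pvStepA (name_parts : List String)
    (s : Option String × Option String × Option Int × Option Int)
    (c : String × String × String) :
    Option String × Option String × Option Int × Option Int :=
  let context_lower := PySem.Str.lower c.2.2
  let name_found := name_parts.any (fun p => PySem.Str.isIn p context_lower)
  if name_found then
    let distance := PySem.Int.floordiv (PySem.Str.len c.2.2) 2
    if c.1 == "email" && pvLtInf distance s.2.2.1 then
      (some c.2.1, s.2.1, some distance, s.2.2.2)
    else if c.1 == "phone" && pvLtInf distance s.2.2.2 then
      (s.1, some c.2.1, s.2.2.1, some distance)
    else s
  else s

def match_agent_contacts (agent_name : String) (contact_info : List (String × String × String)) : Option String × Option String :=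
  let name_parts := PySem.Str.split₀ (PySem.Str.lower agent_name)
  let st := contact_info.foldl (pvStepA name_parts) (none, none, none, none)
  (st.1, st.2.1)

-- ===== PORT B =====
-- matched = [(t, v, len(c) // 2) for t, v, c in contact_info if any(p in c.lower() for p in parts)]
def pvMatched (parts : List String) (ci : List (String × String × String)) : List (String × String × Int) :=
  (ci.filter (fun c => parts.any (fun p => PySem.Str.isIn p (PySem.Str.lower c.2.2)))).map
    (fun c => (c.1, c.2.1, PySem.Int.floordiv (PySem.Str.len c.2.2) 2))

-- [(v, d) for t, v, d in matched if t == <t>]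
def pvGroup (t : String) (m : List (String × String × Int)) : List (String × Int) :=
  (m.filter (fun x => x.1 == t)).map (fun x => (x.2.1, x.2.2))

def match_agent_contacts_alt (agent_name : String) (contact_info : List (String × String × String)) : Option String × Option String :=
  let parts := PySem.Str.split₀ (PySem.Str.lower agent_name)
  let matched := pvMatched parts contact_info
  let best_email := PySem.List.min? (pvGroup "email" matched) (fun x => x.2)
  let best_phone := PySem.List.min? (pvGroup "phone" matched) (fun x => x.2)
  (best_email.map (fun x => x.1), best_phone.map (fun x => x.1))

-- ===== PRECONDITION & SPEC =====
def Spec_match_agent_contacts (agent_name : String) (contact_info : List (String × String × String)) (out : Option String × Option String) : Prop := out = match_agent_contacts_alt agent_name contact_info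
instance (agent_name : String) (contact_info : List (String × String × String)) (out : Option String × Option String) : Decidable (Spec_match_agent_contacts agent_name contact_info out) := by unfold Spec_match_agent_contacts; infer_instance

-- ===== CLAIM (what is proved, stated in full; the proofs are below) =====
def Claim_equal_match_agent_contacts : Prop := ∀ (agent_name : String) (contact_info : List (String × String × String)), Dom_match_agent_contacts agent_name contact_info → Spec_match_agent_contacts agent_name contact_info (match_agent_contacts agent_name contact_info)

-- ===== LEMMAS AND PROOFS =====
-- the fold step underlying PySem.List.min? with key (·.2), with a general accumulator
def pvStep (acc : Option (String × Int)) (x : String × Int) : Option (String × Int) :=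
  match acc with
  | none => some x
  | some m => if x.2 < m.2 then some x else some m

lemma pvMin?_eq_foldl (L : List (String × Int)) :
    PySem.List.min? L (fun x => x.2) = List.foldl pvStep none L := by
  simp only [PySem.List.min?]
  apply List.foldl_ext
  intro acc x _
  cases acc <;> rfl

lemma pvLoopA (parts : List String) (ci : List (String × String × String)) :
    ∀ (eb pb : Option (String × Int)),
    ci.foldl (pvStepA parts) (eb.map Prod.fst, pb.map Prod.fst, eb.map Prod.snd, pb.map Prod.snd)
      = (((pvGroup "email" (pvMatched parts ci)).foldl pvStep eb).map Prod.fst,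
         ((pvGroup "phone" (pvMatched parts ci)).foldl pvStep pb).map Prod.fst,
         ((pvGroup "email" (pvMatched parts ci)).foldl pvStep eb).map Prod.snd,
         ((pvGroup "phone" (pvMatched parts ci)).foldl pvStep pb).map Prod.snd) := by
  induction ci with
  | nil => intro eb pb; simp [pvMatched, pvGroup]
  | cons c ci ih =>
    intro eb pb
    by_cases hc : (parts.any (fun p => PySem.Str.isIn p (PySem.Str.lower c.2.2))) = true
    · by_cases he : c.1 = "email"
      · have hep : ("email" : String) ≠ "phone" := by decide
        simp only [List.foldl_cons, pvStepA, pvMatched, pvGroup, List.filter_cons, hc, he,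
          List.map_cons, List.filter_map, if_true, beq_self_eq_true, Bool.true_and,
          beq_iff_eq, hep, if_false]
        cases eb with
        | none =>
          simp only [pvLtInf, Option.map_none, if_true]
          have := ih (some (c.2.1, PySem.Int.floordiv (PySem.Str.len c.2.2) 2)) pb
          simpa [pvStep, pvMatched, pvGroup, List.filter_map] using this
        | some m =>
          by_cases hd : PySem.Int.floordiv (PySem.Str.len c.2.2) 2 < m.2
          · simp only [pvLtInf, Option.map_some, hd, decide_true, if_true, pvStep]
            have := ih (some (c.2.1, PySem.Int.floordiv (PySem.Str.len c.2.2) 2)) pb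
            simpa [pvMatched, pvGroup, List.filter_map] using this
          · simp only [pvLtInf, Option.map_some, hd, decide_false, if_false, pvStep]
            have := ih (some m) pb
            simpa [pvMatched, pvGroup, List.filter_map] using this
      · by_cases hp : c.1 = "phone"
        · have hpe : ("phone" : String) ≠ "email" := by decide
          simp only [List.foldl_cons, pvStepA, pvMatched, pvGroup, List.filter_cons, hc, hp,
            List.map_cons, List.filter_map, if_true, beq_self_eq_true, Bool.true_and,
            beq_iff_eq, hpe, if_false]
          cases pb with
          | none =>
            simp only [pvLtInf, Option.map_none, if_true]
            have := ih eb (some (c.2.1, PySem.Int.floordiv (PySem.Str.len c.2.2) 2))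
            simpa [pvStep, pvMatched, pvGroup, List.filter_map] using this
          | some m =>
            by_cases hd : PySem.Int.floordiv (PySem.Str.len c.2.2) 2 < m.2
            · simp only [pvLtInf, Option.map_some, hd, decide_true, if_true, pvStep]
              have := ih eb (some (c.2.1, PySem.Int.floordiv (PySem.Str.len c.2.2) 2))
              simpa [pvMatched, pvGroup, List.filter_map] using this
            · simp only [pvLtInf, Option.map_some, hd, decide_false, if_false, pvStep]
              have := ih eb (some m)
              simpa [pvMatched, pvGroup, List.filter_map] using this
        · simp only [List.foldl_cons, pvStepA, pvMatched, pvGroup, List.filter_cons, hc,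
            List.map_cons, List.filter_map, if_true, beq_iff_eq, he, hp,
            if_false]
          have := ih eb pb
          simpa [pvMatched, pvGroup, List.filter_map, he, hp] using this
    · simp only [List.foldl_cons, pvStepA, pvMatched, pvGroup, List.filter_cons,
        Bool.not_eq_true] at hc ⊢
      simp only [hc]
      have := ih eb pb
      simpa [pvMatched, pvGroup, hc] using this

-- ===== VERDICT (by name: the statement is the Claim_ definition above) =====
theorem match_agent_contacts_spec : Claim_equal_match_agent_contacts := by
  intro agent_name contact_info _
  unfold Spec_match_agent_contacts match_agent_contacts match_agent_contacts_alt
  have h := pvLoopA (PySem.Str.split₀ (PySem.Str.lower agent_name)) contact_info none none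
  simp only [Option.map_none] at h
  simp [h, pvMin?_eq_foldl]
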